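-- pv_equiv track=rewrite | github.com/ayoubarich-dev/Compressed_Audio | support.py | decode_huffmane
-- ===== SOURCE A (Python) =====
-- def decode_huffmane(encoded_seq):
--     code_dictt=encoded_seq[0]
--     rev_dict = {key: val for val, key in code_dictt.items()}
--     encodings = set(rev_dict.keys())
--     decoded_seq = []
--     sequence = ""
--     for bit in encoded_seq[1]:
--         sequence += bit
--         if sequence in encodings:
--             decoded_seq.append(rev_dict[sequence])
--             sequence = ""
--     return "".join(decoded_seq)
-- ===== SOURCE B (Python) =====
-- def decode_huffmane(encoded_seq):
--     # Build a prefix trie of the codes (children keyed by bit char, symbol under None),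
--     # then walk the bitstream one node per bit, with no string rebuilding.
--     root = {}
--     for sym, code in encoded_seq[0].items():
--         node = root
--         for bit in code:
--             node = node.setdefault(bit, {})
--         node[None] = sym  # later duplicate codes overwrite, like A's rev_dict
--     out = []
--     node = root
--     for bit in encoded_seq[1]:
--         node = node.get(bit)
--         if node is None:
--             # sequence fell off the trie: it can never equal a code again
--             break
--         if None in node:
--             out.append(node[None])
--             node = root
--     return "".join(out)
-- ===== Notes on version B (the rewrite author's own statement) =====
-- stated objective: alternative
-- what changed: Replaces the growing-string accumulator with repeated set membership tests by a prefix trie built once from the codes and walked one node per bit, with an early break once the stream falls off the trie; it trades hashing of rebuilt prefix strings for pointer-chasing of similar measured cost.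
import Mathlib
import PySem

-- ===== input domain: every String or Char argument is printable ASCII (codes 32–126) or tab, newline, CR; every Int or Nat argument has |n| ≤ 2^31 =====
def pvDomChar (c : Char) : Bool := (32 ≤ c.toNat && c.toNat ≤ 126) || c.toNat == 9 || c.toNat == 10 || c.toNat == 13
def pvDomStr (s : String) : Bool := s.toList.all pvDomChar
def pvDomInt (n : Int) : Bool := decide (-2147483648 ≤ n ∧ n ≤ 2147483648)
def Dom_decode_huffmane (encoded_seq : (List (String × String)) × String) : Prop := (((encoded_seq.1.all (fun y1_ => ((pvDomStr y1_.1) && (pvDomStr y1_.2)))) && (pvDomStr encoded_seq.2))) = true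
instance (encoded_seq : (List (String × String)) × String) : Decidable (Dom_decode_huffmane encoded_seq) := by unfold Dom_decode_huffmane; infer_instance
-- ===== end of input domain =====

-- B decodes via a prefix trie built once from the codes and walked one node per bit (a different algorithm of similar measured cost), proved equal to A on all inputs.


-- ===== PORT A =====
-- loop body of A's 'for bit in encoded_seq[1]': sequence += bit; membership test; append + reset
def aStep (rev : PySem.Dict String String) (encodings : PySem.Set String)
    (st : List String × List Char) (bit : Char) : List String × List Char :=
  let s' := st.2 ++ [bit]
  if encodings.contains (String.ofList s') then
    (st.1 ++ [rev.getD (String.ofList s') ""], [])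
  else
    (st.1, s')

def decode_huffmane (encoded_seq : (List (String × String)) × String) : String :=
  let code_dictt := PySem.Dict.ofList encoded_seq.1
  let rev := code_dictt.items.foldl (fun d p => d.insert p.2 p.1) PySem.Dict.empty
  let encodings : PySem.Set String := PySem.Set.ofList rev.keys
  let st := encoded_seq.2.toList.foldl (aStep rev encodings) ([], [])
  PySem.Str.join "" st.1

-- ===== PORT B =====
-- prefix trie: children keyed by bit char (explicit child list, a mutual pair), symbol at the node
mutual
inductive PTrie : Type where
  | node (sym : Option String) (kids : PKids)
inductive PKids : Type where
  | nil
  | cons (c : Char) (t : PTrie) (rest : PKids)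
end

def tSym : PTrie → Option String | .node o _ => o
def tKids : PTrie → PKids | .node _ k => k

def kidsGet : PKids → Char → Option PTrie
  | .nil, _ => none
  | .cons c t r, x => if x = c then some t else kidsGet r x

def kidsSet : PKids → Char → PTrie → PKids
  | .nil, x, t => .cons x t .nil
  | .cons c u r, x, t => if x = c then .cons c t r else .cons c u (kidsSet r x t)

-- node.setdefault(bit, {}) chain followed by node[None] = sym
def tinsert : PTrie → List Char → String → PTrie
  | .node _ k, [], v => .node (some v) k
  | .node o k, c :: cs, v =>
      .node o (kidsSet k c (tinsert ((kidsGet k c).getD (.node none .nil)) cs v))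

def step (t : PTrie) (c : Char) : Option PTrie := kidsGet (tKids t) c

-- B's bit loop: walk, break when off the trie, emit + reset at a node holding a symbol
def bwalk (root : PTrie) : List Char → PTrie → List String → List String
  | [], _, out => out
  | c :: cs, n, out =>
    match step n c with
    | none => out
    | some n' =>
      match tSym n' with
      | some v => bwalk root cs root (out ++ [v])
      | none => bwalk root cs n' out

def decode_huffmane_alt (encoded_seq : (List (String × String)) × String) : String :=
  let items := (PySem.Dict.ofList encoded_seq.1).items
  let root := items.foldl (fun t p => tinsert t p.2.toList p.1) (.node none .nil)
  PySem.Str.join "" (bwalk root encoded_seq.2.toList root [])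

-- ===== PRECONDITION & SPEC =====
def Spec_decode_huffmane (encoded_seq : (List (String × String)) × String) (out : String) : Prop := out = decode_huffmane_alt encoded_seq
instance (encoded_seq : (List (String × String)) × String) (out : String) : Decidable (Spec_decode_huffmane encoded_seq out) := by unfold Spec_decode_huffmane; infer_instance

-- ===== CLAIM (what is proved, stated in full; the proofs are below) =====
def Claim_equal_decode_huffmane : Prop := ∀ (encoded_seq : (List (String × String)) × String), Dom_decode_huffmane encoded_seq → Spec_decode_huffmane encoded_seq (decode_huffmane encoded_seq)

-- ===== LEMMAS AND PROOFS =====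

def walkT : PTrie → List Char → Option PTrie
  | t, [] => some t
  | t, c :: cs =>
    match step t c with
    | none => none
    | some u => walkT u cs

def symAt (t : PTrie) (s : List Char) : Option String := (walkT t s).bind tSym

theorem ofList_eq_iff (s : List Char) (c : String) : String.ofList s = c ↔ s = c.toList := by
  constructor
  · intro h; rw [← h]; simp
  · intro h; subst h; simp

theorem kidsGet_kidsSet : ∀ (k : PKids) (x y : Char) (t : PTrie),
    kidsGet (kidsSet k x t) y = if y = x then some t else kidsGet k y
  | .nil, x, y, t => by by_cases h : y = x <;> simp [kidsSet, kidsGet, h]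
  | .cons c u r, x, y, t => by
    by_cases hx : x = c
    · subst hx
      by_cases hy : y = x <;> simp [kidsSet, kidsGet, hy]
    · have ih := kidsGet_kidsSet r x y t
      by_cases hy : y = c
      · subst hy
        have hyx : ¬ y = x := fun h => hx h.symm
        simp [kidsSet, kidsGet, hx, hyx]
      · simp [kidsSet, kidsGet, hx, hy, ih]

theorem symAt_empty (s : List Char) : symAt (.node none .nil) s = none := by
  cases s <;> simp [symAt, walkT, step, tKids, tSym, kidsGet]

theorem symAt_tinsert (cs : List Char) (t : PTrie) (v : String) (s : List Char) :
    symAt (tinsert t cs v) s = if s = cs then some v else symAt t s := by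
  induction cs generalizing t s with
  | nil =>
    obtain ⟨o, k⟩ := t
    cases s with
    | nil => simp [tinsert, symAt, walkT, tSym]
    | cons x xs => simp [tinsert, symAt, walkT, step, tKids]
  | cons c cs ih =>
    obtain ⟨o, k⟩ := t
    cases s with
    | nil => simp [tinsert, symAt, walkT, tSym]
    | cons x xs =>
      simp only [tinsert, symAt, walkT, step, tKids, kidsGet_kidsSet]
      by_cases hx : x = c
      · subst hx
        have := ih ((kidsGet k x).getD (.node none .nil)) xs
        by_cases hxs : xs = cs
        · subst hxs; simp [symAt] at this ⊢; simp [this]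
        · simp [hxs, symAt] at this ⊢
          rw [this]
          cases hkg : kidsGet k x with
          | none => simpa [symAt] using symAt_empty xs
          | some u => simp
      · simp [hx]

theorem walkT_append (t : PTrie) (s r : List Char) :
    walkT t (s ++ r) = (walkT t s).bind (fun u => walkT u r) := by
  induction s generalizing t with
  | nil => simp [walkT]
  | cons c cs ih =>
    simp only [List.cons_append, walkT]
    cases step t c <;> simp [ih]

theorem build_symAt (l : List (String × String)) (d : PySem.Dict String String) (t : PTrie)
    (h : ∀ s : List Char, symAt t s = d.get? (String.ofList s)) :
    ∀ s : List Char,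
      symAt (l.foldl (fun t p => tinsert t p.2.toList p.1) t) s
        = (l.foldl (fun d p => d.insert p.2 p.1) d).get? (String.ofList s) := by
  induction l generalizing t d with
  | nil => exact h
  | cons p l ih =>
    simp only [List.foldl_cons]
    apply ih
    intro s
    rw [symAt_tinsert, PySem.Dict.get?_insert]
    by_cases hs : s = p.2.toList
    · simp [hs]
    · have : ¬ String.ofList s = p.2 := by rw [ofList_eq_iff]; exact hs
      simp [hs, this, h s]

theorem contains_ofList_keys (d : PySem.Dict String String) (k : String) :
    (PySem.Set.ofList d.keys).contains k = (d.get? k).isSome := by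
  rw [← PySem.Dict.contains_eq_isSome_get?, PySem.Dict.contains_eq_decide_mem_keys]
  simp [PySem.Set.contains]

theorem getD_eq_get?_getD (d : PySem.Dict String String) (k : String) (v : String) :
    d.getD k v = (d.get? k).getD v := by
  simp [PySem.Dict.getD, PySem.Dict.get?]

theorem main_loop (rev : PySem.Dict String String) (root : PTrie)
    (hrt : ∀ s : List Char, symAt root s = rev.get? (String.ofList s)) :
    ∀ (bits : List Char) (out : List String) (seq : List Char),
      (∀ n, walkT root seq = some n →
        (bits.foldl (aStep rev (PySem.Set.ofList rev.keys)) (out, seq)).1 = bwalk root bits n out)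
      ∧ (walkT root seq = none →
        (bits.foldl (aStep rev (PySem.Set.ofList rev.keys)) (out, seq)).1 = out) := by
  intro bits
  induction bits with
  | nil =>
    intro out seq
    exact ⟨fun n _ => rfl, fun _ => rfl⟩
  | cons c bits ih =>
    intro out seq
    have hwalk : walkT root (seq ++ [c]) = (walkT root seq).bind (fun n => step n c) := by
      rw [walkT_append]
      congr 1
      funext n
      cases h : step n c <;> simp [walkT, h]
    have hmem : (PySem.Set.ofList rev.keys).contains (String.ofList (seq ++ [c]))
        = (symAt root (seq ++ [c])).isSome := by
      rw [contains_ofList_keys, hrt]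
    constructor
    · intro n hn
      simp only [List.foldl_cons, aStep]
      rw [hmem]
      have hsym : symAt root (seq ++ [c]) = (step n c).bind tSym := by
        simp [symAt, hwalk, hn]
      cases hstep : step n c with
      | none =>
        have hdead : walkT root (seq ++ [c]) = none := by simp [hwalk, hn, hstep]
        simp only [hsym, Option.bind_none, Option.isSome_none, Bool.false_eq_true,
          if_false, bwalk, hstep]
        exact (ih out (seq ++ [c])).2 hdead
      | some n' =>
        have hn' : walkT root (seq ++ [c]) = some n' := by simp [hwalk, hn, hstep]
        cases hv : tSym n' with
        | some v =>
          have hget : rev.get? (String.ofList (seq ++ [c])) = some v := by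
            rw [← hrt]; simp [symAt, hn', hv]
          simp only [hsym, hstep, Option.bind_some, hv, Option.isSome_some, if_true,
            bwalk, getD_eq_get?_getD, hget, Option.getD_some]
          exact ((ih (out ++ [v]) []).1 root rfl)
        | none =>
          simp only [hsym, hstep, Option.bind_some, hv, Option.isSome_none,
            Bool.false_eq_true, if_false, bwalk]
          exact (ih out (seq ++ [c])).1 n' hn'
    · intro hn
      have hdead : walkT root (seq ++ [c]) = none := by simp [hwalk, hn]
      simp only [List.foldl_cons, aStep]
      rw [hmem]
      have : symAt root (seq ++ [c]) = none := by simp [symAt, hdead]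
      simp only [this, Option.isSome_none, Bool.false_eq_true, if_false]
      exact (ih out (seq ++ [c])).2 hdead

-- ===== VERDICT (by name: the statement is the Claim_ definition above) =====
theorem decode_huffmane_spec : Claim_equal_decode_huffmane := by
  unfold Claim_equal_decode_huffmane
  intro e _
  unfold Spec_decode_huffmane decode_huffmane decode_huffmane_alt
  simp only []
  set items := (PySem.Dict.ofList e.1).items with hitems
  set rev := items.foldl (fun d p => d.insert p.2 p.1) PySem.Dict.empty with hrev
  set root := items.foldl (fun t p => tinsert t p.2.toList p.1) (PTrie.node none .nil) with hroot
  have hrt : ∀ s : List Char, symAt root s = rev.get? (String.ofList s) := by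
    intro s
    rw [hroot, hrev]
    exact build_symAt items PySem.Dict.empty _ (fun s => by simp [symAt_empty]) s
  have := (main_loop rev root hrt e.2.toList [] []).1 root rfl
  rw [this]
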